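-- pv_equiv track=rewrite | github.com/pypi-data/pypi-mirror-400 | packages/epubkit/epubkit-0.1.0.post202601060842-py3-none-any.whl/epubkit/epub/path_resolver.py | find_in_zip_by_basename
-- ===== SOURCE A (Python) =====
-- from typing import List, Optional, Tuple
--
-- def find_in_zip_by_basename(basename: str, zip_namelist: List[str]) -> Optional[str]:
--     if not basename:
--         return None
--     base_lower = basename.lower()
--     # first try exact matches
--     for name in zip_namelist:
--         if name == basename:
--             return name
--     # then try endswith match (case-insensitive)
--     for name in zip_namelist:
--         if name.lower().endswith("/" + base_lower) or name.lower().endswith(base_lower):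
--             return name
--     return None
-- ===== SOURCE B (Python) =====
-- def find_in_zip_by_basename(basename, zip_namelist):
--     if not basename:
--         return None
--     base_lower = basename.lower()
--     suffix_match = None
--     for name in zip_namelist:
--         if name == basename:
--             return name
--         if suffix_match is None and (name.lower().endswith("/" + base_lower) or name.lower().endswith(base_lower)):
--             suffix_match = name
--     return suffix_match
-- ===== Notes on version B (the rewrite author's own statement) =====
-- stated objective: alternative
-- what changed: Replaces A's two sequential scans (exact, then suffix) with a single pass that returns on an exact match and records the first suffix candidate in an accumulator.
import Mathlib
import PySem

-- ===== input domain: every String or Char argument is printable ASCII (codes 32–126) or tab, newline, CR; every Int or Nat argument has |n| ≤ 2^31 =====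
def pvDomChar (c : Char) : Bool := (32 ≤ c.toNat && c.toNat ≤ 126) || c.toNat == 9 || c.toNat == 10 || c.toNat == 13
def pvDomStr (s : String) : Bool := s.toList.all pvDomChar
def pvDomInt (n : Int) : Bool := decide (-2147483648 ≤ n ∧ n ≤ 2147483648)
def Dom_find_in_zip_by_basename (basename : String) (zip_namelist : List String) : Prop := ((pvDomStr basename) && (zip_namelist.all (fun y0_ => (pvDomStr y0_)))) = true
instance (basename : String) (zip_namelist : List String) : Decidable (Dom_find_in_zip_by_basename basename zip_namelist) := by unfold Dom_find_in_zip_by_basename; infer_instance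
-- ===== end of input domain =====

-- B merges A's two scans into one pass with a suffix-candidate accumulator (return value only; no side effects).
-- ===== PORT A =====
-- first loop of A: return the first exact match
def pvALoop1 (basename : String) : List String → Option String
  | [] => none
  | name :: rest => if name = basename then some name else pvALoop1 basename rest

-- second loop of A: return the first case-insensitive suffix match
def pvALoop2 (base_lower : String) : List String → Option String
  | [] => none
  | name :: rest =>
      if PySem.Str.endswith (PySem.Str.lower name) ("/" ++ base_lower)
         || PySem.Str.endswith (PySem.Str.lower name) base_lower
      then some name else pvALoop2 base_lower rest

def find_in_zip_by_basename (basename : String) (zip_namelist : List String) : Option String :=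
  if basename = "" then none
  else
    let base_lower := PySem.Str.lower basename
    match pvALoop1 basename zip_namelist with
    | some name => some name
    | none => pvALoop2 base_lower zip_namelist

-- ===== PORT B =====
-- B's single pass: exact match returns immediately; first suffix match is recorded in suffix_match
def pvBLoop (basename base_lower : String) (suffix_match : Option String) : List String → Option String
  | [] => suffix_match
  | name :: rest =>
      if name = basename then some name
      else if suffix_match.isNone
              && (PySem.Str.endswith (PySem.Str.lower name) ("/" ++ base_lower)
                  || PySem.Str.endswith (PySem.Str.lower name) base_lower)
      then pvBLoop basename base_lower (some name) rest
      else pvBLoop basename base_lower suffix_match rest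

def find_in_zip_by_basename_alt (basename : String) (zip_namelist : List String) : Option String :=
  if basename = "" then none
  else pvBLoop basename (PySem.Str.lower basename) none zip_namelist

-- ===== PRECONDITION & SPEC =====
def Spec_find_in_zip_by_basename (basename : String) (zip_namelist : List String) (out : Option String) : Prop := out = find_in_zip_by_basename_alt basename zip_namelist
instance (basename : String) (zip_namelist : List String) (out : Option String) : Decidable (Spec_find_in_zip_by_basename basename zip_namelist out) := by unfold Spec_find_in_zip_by_basename; infer_instance

-- ===== CLAIM (what is proved, stated in full; the proofs are below) =====
def Claim_equal_find_in_zip_by_basename : Prop := ∀ (basename : String) (zip_namelist : List String), Dom_find_in_zip_by_basename basename zip_namelist → Spec_find_in_zip_by_basename basename zip_namelist (find_in_zip_by_basename basename zip_namelist)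

-- ===== LEMMAS AND PROOFS =====

-- ===== VERDICT (by name: the statement is the Claim_ definition above) =====
-- the one-pass loop equals: first exact match, else the recorded candidate, else the first suffix match
theorem pvBLoop_eq (basename base_lower : String) (zs : List String) (sm : Option String) :
    pvBLoop basename base_lower sm zs =
      match pvALoop1 basename zs with
      | some n => some n
      | none => match sm with
                | some x => some x
                | none => pvALoop2 base_lower zs := by
  induction zs generalizing sm with
  | nil => cases sm <;> simp [pvBLoop, pvALoop1, pvALoop2]
  | cons name rest ih =>
    by_cases h1 : name = basename
    · simp [pvBLoop, pvALoop1, h1]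
    · by_cases h2 : PySem.Chars.endswith (PySem.Chars.lower name.toList) ('/' :: base_lower.toList) = true
                     ∨ PySem.Chars.endswith (PySem.Chars.lower name.toList) base_lower.toList = true
      · cases sm with
        | none => cases hf : pvALoop1 basename rest <;>
            simp [pvBLoop, pvALoop1, pvALoop2, h1, h2, ih, hf]
        | some x => simp [pvBLoop, pvALoop1, h1, ih]
      · cases sm with
        | none => simp [pvBLoop, pvALoop1, pvALoop2, h1, h2, ih]
        | some x => simp [pvBLoop, pvALoop1, h1, ih]

theorem find_in_zip_by_basename_spec : Claim_equal_find_in_zip_by_basename := by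
  intro basename zs _
  unfold Spec_find_in_zip_by_basename find_in_zip_by_basename find_in_zip_by_basename_alt
  by_cases h : basename = ""
  · simp [h]
  · simp only [h, if_false, pvBLoop_eq]
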